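-- pv_equiv track=rewrite | github.com/tan-eddie/google-code-jam-2020 | qualification/vestigium/vestigium.py | duplicate_rows
-- ===== SOURCE A (Python) =====
-- def duplicate_rows(matrix):
--     duplicates = 0
--     for row in matrix:
--         prev = set()
--         for e in row:
--             if e in prev:
--                 duplicates += 1
--                 break
--             else:
--                 prev.add(e)
--
--     return duplicates
-- ===== SOURCE B (Python) =====
-- def duplicate_rows(matrix):
--     total = 0
--     for row in matrix:
--         s = sorted(row)
--         if any(x == y for x, y in zip(s, s[1:])):
--             total += 1
--     return total
-- ===== Notes on version B (the rewrite author's own statement) =====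
-- stated objective: alternative
-- what changed: Detects a duplicate in a row by sorting it and scanning adjacent pairs for equality (sort-then-scan) instead of A's incremental hash-set membership scan with early break.
import Mathlib
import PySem

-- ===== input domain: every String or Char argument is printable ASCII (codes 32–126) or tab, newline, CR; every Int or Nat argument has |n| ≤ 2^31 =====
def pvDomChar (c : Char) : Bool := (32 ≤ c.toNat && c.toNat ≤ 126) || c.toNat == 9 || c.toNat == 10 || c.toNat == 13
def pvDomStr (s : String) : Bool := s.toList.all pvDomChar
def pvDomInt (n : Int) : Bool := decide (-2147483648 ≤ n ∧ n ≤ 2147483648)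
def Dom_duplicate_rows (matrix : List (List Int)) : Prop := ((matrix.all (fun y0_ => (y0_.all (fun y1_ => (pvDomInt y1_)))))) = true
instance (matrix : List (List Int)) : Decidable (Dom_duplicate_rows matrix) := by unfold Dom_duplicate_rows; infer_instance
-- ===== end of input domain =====

-- B detects a duplicate in a row by sorting it and scanning adjacent pairs for equality, instead of A's incremental set-membership scan; alternative algorithm, similar cost.


-- ===== PORT A =====
-- inner loop of A: scan the row keeping a set 'prev', break (return true) on first repeat
def dupRowLoop : List Int → PySem.Set Int → Bool
  | [], _ => false
  | e :: rest, prev =>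
      if PySem.Set.contains prev e then true
      else dupRowLoop rest (PySem.Set.add prev e)

def duplicate_rows (matrix : List (List Int)) : Int :=
  matrix.foldl (fun duplicates row =>
    if dupRowLoop row PySem.Set.empty then duplicates + 1 else duplicates) 0

-- ===== PORT B =====
-- any(x == y for x, y in zip(s, s[1:]))
def hasAdjEq (s : List Int) : Bool :=
  (s.zip s.tail).any (fun p => p.1 == p.2)

def duplicate_rows_alt (matrix : List (List Int)) : Int :=
  matrix.foldl (fun total row =>
    if hasAdjEq (PySem.List.sorted row (fun x => x) false) then total + 1 else total) 0

-- ===== PRECONDITION & SPEC =====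
def Spec_duplicate_rows (matrix : List (List Int)) (out : Int) : Prop := out = duplicate_rows_alt matrix
instance (matrix : List (List Int)) (out : Int) : Decidable (Spec_duplicate_rows matrix out) := by unfold Spec_duplicate_rows; infer_instance

-- ===== CLAIM (what is proved, stated in full; the proofs are below) =====
def Claim_equal_duplicate_rows : Prop := ∀ (matrix : List (List Int)), Dom_duplicate_rows matrix → Spec_duplicate_rows matrix (duplicate_rows matrix)

-- ===== LEMMAS AND PROOFS =====

-- A's inner loop returns false exactly on a duplicate-free row disjoint from 'prev'
lemma dupRowLoop_false_iff (row : List Int) (prev : PySem.Set Int) :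
    dupRowLoop row prev = false ↔ (row.Nodup ∧ ∀ x ∈ row, x ∉ prev) := by
  induction row generalizing prev with
  | nil => simp [dupRowLoop]
  | cons e rest ih =>
      by_cases h : e ∈ prev
      · have hc : PySem.Set.contains prev e = true := (PySem.Set.contains_iff _ _).mpr h
        simp [dupRowLoop, h]
      · have hc : PySem.Set.contains prev e = false := by
          cases hcv : PySem.Set.contains prev e
          · rfl
          · exact absurd ((PySem.Set.contains_iff _ _).mp hcv) h
        have hadd : PySem.Set.add prev e = prev ++ [e] := by
          unfold PySem.Set.add; simp [h]
        have hstep : dupRowLoop (e :: rest) prev = dupRowLoop rest (prev ++ [e]) := by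
          simp only [dupRowLoop, hc, Bool.false_eq_true, if_false, hadd]
        rw [hstep, ih]
        constructor
        · rintro ⟨hnd, hall⟩
          have hke : ∀ x ∈ rest, x ∉ prev ∧ x ≠ e := by
            intro x hx
            have hm := hall x hx
            simp only [List.mem_append, List.mem_singleton, not_or] at hm
            exact hm
          refine ⟨List.nodup_cons.mpr ⟨fun he => (hke e he).2 rfl, hnd⟩, ?_⟩
          intro x hx
          rcases List.mem_cons.mp hx with rfl | hx
          · exact h
          · exact (hke x hx).1
        · rintro ⟨hnd, hall⟩
          have hen : e ∉ rest := (List.nodup_cons.mp hnd).1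
          refine ⟨(List.nodup_cons.mp hnd).2, ?_⟩
          intro x hx hxm
          rcases List.mem_append.mp hxm with hxp | hxe
          · exact hall x (List.mem_cons.mpr (Or.inr hx)) hxp
          · have hx_eq : x = e := by simpa using hxe
            exact hen (hx_eq ▸ hx)

-- a (≤)-sorted list with no adjacent equal pair is Nodup, and conversely
lemma hasAdjEq_false_iff (l : List Int) (h : l.Pairwise (· ≤ ·)) :
    hasAdjEq l = false ↔ l.Nodup := by
  induction l with
  | nil => simp [hasAdjEq]
  | cons a t ih =>
      cases t with
      | nil => simp [hasAdjEq]
      | cons b t' =>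
          have hp : (b :: t').Pairwise (· ≤ ·) := h.of_cons
          have hab : a ≤ b := (List.pairwise_cons.mp h).1 b (by simp)
          have hbt : ∀ x ∈ t', b ≤ x := (List.pairwise_cons.mp hp).1
          have hstep : hasAdjEq (a :: b :: t') = ((a == b) || hasAdjEq (b :: t')) := by
            simp [hasAdjEq]
          rw [hstep]
          constructor
          · intro hf
            have h1 : (a == b) = false := by
              cases hv : (a == b) <;> simp [hv] at hf ⊢
            have h2 : hasAdjEq (b :: t') = false := by
              cases hv : hasAdjEq (b :: t') <;> simp [hv] at hf ⊢
            have hanb : a ≠ b := by simpa using h1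
            have hnd : (b :: t').Nodup := (ih hp).mp h2
            refine List.nodup_cons.mpr ⟨?_, hnd⟩
            intro ha
            rcases List.mem_cons.mp ha with rfl | ha
            · exact hanb rfl
            · exact hanb (le_antisymm hab (hbt a ha))
          · intro hnd
            have h1 : a ≠ b := by
              intro hab'; exact (List.nodup_cons.mp hnd).1 (by simp [hab'])
            have h2 : hasAdjEq (b :: t') = false :=
              (ih hp).mpr (List.nodup_cons.mp hnd).2
            simp [h1, h2]

-- the two per-row tests agree
lemma row_tests_agree (row : List Int) :
    dupRowLoop row PySem.Set.empty = hasAdjEq (PySem.List.sorted row (fun x => x) false) := by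
  have h1 : dupRowLoop row PySem.Set.empty = false ↔ row.Nodup := by
    rw [dupRowLoop_false_iff]
    simp [PySem.Set.empty]
  have hperm : (PySem.List.sorted row (fun x => x) false).Perm row :=
    PySem.List.sorted_perm row (fun x => x) false
  have h2 : hasAdjEq (PySem.List.sorted row (fun x => x) false) = false ↔ row.Nodup := by
    rw [hasAdjEq_false_iff _ (PySem.List.sorted_pairwise row (fun x => x))]
    exact hperm.nodup_iff
  cases ha : dupRowLoop row PySem.Set.empty
  · exact (h2.mpr (h1.mp ha)).symm
  · cases hb : hasAdjEq (PySem.List.sorted row (fun x => x) false)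
    · exact absurd (h1.mpr (h2.mp hb)) (fun hf => by rw [hf] at ha; exact Bool.noConfusion ha)
    · rfl

-- ===== VERDICT (by name: the statement is the Claim_ definition above) =====
theorem duplicate_rows_spec : Claim_equal_duplicate_rows := by
  intro matrix _
  unfold Spec_duplicate_rows duplicate_rows duplicate_rows_alt
  congr 1
  funext s row
  rw [row_tests_agree]
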